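-- pv_equiv track=rewrite | github.com/antipodite/misc-linguistics | filtercognatesets.py | cognates_for_language
-- ===== SOURCE A (Python) =====
-- def cognates_for_language(rows):
--     """Go through each language and compile cognate set for that language"""
--     result = {}
--     for row in rows:
--         language = row["Language"]
--         cognates = set(row["Cognacy"].split(","))
--         if language in result:
--             result[language].update(cognates)
--         else:
--             result[language] = cognates
--     return result
-- ===== SOURCE B (Python) =====
-- def cognates_for_language(rows):
--     """Go through each language and compile cognate set for that language.
--
--     Two-pass re-implementation: first collect the languages in order of first
--     appearance, then for each language gather the union of cognate sets over
--     every row of that language."""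
--     langs = []
--     for row in rows:
--         lang = row["Language"]
--         if lang not in langs:
--             langs.append(lang)
--     result = {}
--     for lang in langs:
--         s = set()
--         for row in rows:
--             if row["Language"] == lang:
--                 s.update(row["Cognacy"].split(","))
--         result[lang] = s
--     return result
-- ===== Notes on version B (the rewrite author's own statement) =====
-- stated objective: alternative
-- what changed: Replaces A's single-pass dict accumulation (look up / update-or-insert per row) with a two-pass per-language gather: collect the distinct languages in first-appearance order, then for each language union the cognate sets of all its rows.
import Mathlib
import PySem

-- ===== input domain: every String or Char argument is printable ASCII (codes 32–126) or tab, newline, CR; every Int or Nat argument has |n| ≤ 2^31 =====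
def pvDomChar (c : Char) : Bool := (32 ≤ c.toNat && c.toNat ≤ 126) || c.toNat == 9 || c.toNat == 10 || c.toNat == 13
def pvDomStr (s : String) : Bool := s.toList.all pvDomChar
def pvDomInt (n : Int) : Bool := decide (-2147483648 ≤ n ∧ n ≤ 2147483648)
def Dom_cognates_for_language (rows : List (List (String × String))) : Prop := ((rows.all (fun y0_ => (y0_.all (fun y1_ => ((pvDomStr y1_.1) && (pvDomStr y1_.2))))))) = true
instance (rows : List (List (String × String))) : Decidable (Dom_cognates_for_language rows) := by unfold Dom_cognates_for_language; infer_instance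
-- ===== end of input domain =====

-- B replaces A's single-pass dict accumulation with a two-pass per-language gather
-- (languages in first-appearance order, then a union over all rows of each language); alternative decomposition, not faster.

-- ===== PORT A =====
-- row["Language"] / row["Cognacy"]: dict lookup; the .getD "" default is only reached
-- when the key is missing, where Python raises KeyError — excluded by Pre_.
def pvRowLang (row : List (String × String)) : String :=
  ((PySem.Dict.ofList row).get? "Language").getD ""
def pvRowCog (row : List (String × String)) : String :=
  ((PySem.Dict.ofList row).get? "Cognacy").getD ""

-- one iteration of A's loop body
def pvStepA (result : PySem.Dict String (PySem.Set String)) (row : List (String × String)) :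
    PySem.Dict String (PySem.Set String) :=
  let language := pvRowLang row
  let cognates : PySem.Set String := PySem.Set.ofList (((PySem.Str.split? (pvRowCog row) ",").getD []))
  if result.contains language then
    result.modify language PySem.Set.empty (fun s => PySem.Set.update s cognates)
  else
    result.insert language cognates

def cognates_for_language (rows : List (List (String × String))) : List (String × List String) :=
  (rows.foldl pvStepA PySem.Dict.empty).items

-- ===== PORT B =====
-- inner loop of B: union the cognates of every row whose language is `lang`
def pvGather (rows : List (List (String × String))) (lang : String) : PySem.Set String :=
  rows.foldl
    (fun s row =>
      if pvRowLang row = lang then PySem.Set.update s (((PySem.Str.split? (pvRowCog row) ",").getD [])) else s)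
    PySem.Set.empty

def cognates_for_language_alt (rows : List (List (String × String))) : List (String × List String) :=
  let langs : PySem.Set String :=
    rows.foldl (fun acc row => PySem.Set.add acc (pvRowLang row)) PySem.Set.empty
  langs.map (fun lang => (lang, pvGather rows lang))

-- ===== PRECONDITION & SPEC =====
-- Pre_ excludes exactly the rows missing a "Language" or "Cognacy" key, on which Python A raises KeyError.
def Pre_cognates_for_language (rows : List (List (String × String))) : Prop :=
  ∀ row ∈ rows, "Language" ∈ row.map Prod.fst ∧ "Cognacy" ∈ row.map Prod.fst
instance (rows : List (List (String × String))) : Decidable (Pre_cognates_for_language rows) := by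
  unfold Pre_cognates_for_language; infer_instance

def pvWitness_cognates_for_language : (List (List (String × String))) :=
  [[("Language", "en"), ("Cognacy", "1,2")], [("Language", "de"), ("Cognacy", "2")]]

def Spec_cognates_for_language (rows : List (List (String × String))) (out : List (String × List String)) : Prop := out = cognates_for_language_alt rows
instance (rows : List (List (String × String))) (out : List (String × List String)) : Decidable (Spec_cognates_for_language rows out) := by unfold Spec_cognates_for_language; infer_instance

-- ===== CLAIM (what is proved, stated in full; the proofs are below) =====
def Claim_equal_cognates_for_language : Prop := ∀ (rows : List (List (String × String))), Dom_cognates_for_language rows → Pre_cognates_for_language rows → Spec_cognates_for_language rows (cognates_for_language rows)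

-- ===== LEMMAS AND PROOFS =====

-- updating with set(xs) is the same as updating with xs
lemma set_update_ofList {s : PySem.Set String} (xs : List String) :
    PySem.Set.update s (PySem.Set.ofList xs) = PySem.Set.update s xs := by
  rw [PySem.Set.update_eq_append_filter, PySem.Set.update_eq_append_filter,
    PySem.Set.ofList_ofList]

-- keys of A's accumulator: the languages seen so far, first-occurrence order
lemma keys_foldl_stepA (rows : List (List (String × String)))
    (d : PySem.Dict String (PySem.Set String)) :
    (rows.foldl pvStepA d).keys = PySem.Set.update d.keys (rows.map pvRowLang) := by
  induction rows generalizing d with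
  | nil => simp [PySem.Set.update_nil]
  | cons r rs ih =>
    have hstep : (pvStepA d r).keys = PySem.Set.add d.keys (pvRowLang r) := by
      unfold pvStepA
      by_cases h : d.contains (pvRowLang r) = true
      · rw [if_pos h, PySem.Dict.keys_modify, PySem.Dict.keys_insert_of_contains _ _ h,
          PySem.Set.add_of_mem ((PySem.Dict.contains_iff_mem_keys d _).mp h)]
      · rw [if_neg h,
          PySem.Dict.keys_insert_of_not_contains _ _ (by simpa using h),
          PySem.Set.add_of_not_mem
            (fun hm => h ((PySem.Dict.contains_iff_mem_keys d _).mpr hm))]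
    simp only [List.foldl_cons, List.map_cons, PySem.Set.update_cons, ih, hstep]

-- the value A has accumulated for `lang`: B's gather loop, started from d's value
lemma getD_foldl_stepA (rows : List (List (String × String)))
    (d : PySem.Dict String (PySem.Set String)) (lang : String) :
    (rows.foldl pvStepA d).getD lang PySem.Set.empty =
      rows.foldl
        (fun s row =>
          if pvRowLang row = lang then PySem.Set.update s (((PySem.Str.split? (pvRowCog row) ",").getD []))
          else s)
        (d.getD lang PySem.Set.empty) := by
  induction rows generalizing d with
  | nil => rfl
  | cons r rs ih =>
    simp only [List.foldl_cons, ih]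
    congr 1
    unfold pvStepA
    by_cases h : d.contains (pvRowLang r) = true
    · rw [if_pos h, PySem.Dict.getD_modify]
      by_cases he : pvRowLang r = lang
      · rw [if_pos he, if_pos he.symm, he, set_update_ofList]
      · rw [if_neg he, if_neg (fun hx => he hx.symm)]
    · rw [if_neg h, PySem.Dict.getD_insert]
      by_cases he : pvRowLang r = lang
      · rw [if_pos he, if_pos he.symm, ← he,
          PySem.Dict.getD_of_not_contains d _ (by simpa using h),
          PySem.Set.update_empty]
      · rw [if_neg he, if_neg (fun hx => he hx.symm)]

-- ===== VERDICT (by name: the statement is the Claim_ definition above) =====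
theorem cognates_for_language_spec : Claim_equal_cognates_for_language := by
  intro rows _ _
  unfold Spec_cognates_for_language cognates_for_language cognates_for_language_alt
  have hnd : (rows.foldl pvStepA PySem.Dict.empty).keys.Nodup := by
    rw [keys_foldl_stepA, PySem.Dict.keys_empty, PySem.Set.update_nil_left]
    exact PySem.Set.nodup_ofList _
  rw [PySem.Dict.items_eq_map_keys _ hnd PySem.Set.empty, keys_foldl_stepA,
    PySem.Dict.keys_empty, PySem.Set.update_nil_left,
    ← PySem.Set.update_map_eq_foldl_add, PySem.Set.update_empty]
  refine List.map_congr_left (fun lang _ => ?_)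
  rw [getD_foldl_stepA, PySem.Dict.getD_empty]
  rfl
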